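-- pv_equiv track=rewrite | github.com/pypi-data/pypi-mirror-272 | packages/TamilEnkal/TamilEnkal-1.0.0-py3-none-any.whl/TamilEnkal/TamilEnkal.py | Perumam
-- ===== SOURCE A (Python) =====
-- def Perumam(a,b):
--     Input=max(a,b)
--     Num_Map = {
--         '0': '௦',
--         '1': '௧',
--         '2': '௨',
--         '3': '௩',
--         '4': '௪',
--         '5': '௫',
--         '6': '௬',
--         '7': '௭',
--         '8': '௮',
--         '9': '௯',
--         '-': '-',
--         '.': '.'
--     }
--     Input=str(Input)
--     result=''
--     Length=len(Input)
--     Count=0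
--     for i in range(Length):
--         if Input[i].isdigit() or Input[i]=='.':
--             result+=str(Num_Map[Input[i]])
--             Count+=1
--         else:
--             break
--     if Length==Count:
--         return result
--     else:
--         return 'தவறான உள்ளீடு'
-- ===== SOURCE B (Python) =====
-- def Perumam(a, b):
--     m = max(a, b)
--     if m < 0:
--         return 'தவறான உள்ளீடு'
--     digits = '௦௧௨௩௪௫௬௭௮௯'
--     out = ''
--     while True:
--         out = digits[m % 10] + out
--         m //= 10
--         if m == 0:
--             return out
-- ===== Notes on version B (the rewrite author's own statement) =====
-- stated objective: alternative
-- what changed: B never converts the number to a decimal string at all: after a sign test it extracts digits arithmetically with repeated divmod by 10 and prepends the corresponding Tamil digit, whereas A builds str(max(a,b)) and scans its characters through a dict with a break-and-count check.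
import Mathlib
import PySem

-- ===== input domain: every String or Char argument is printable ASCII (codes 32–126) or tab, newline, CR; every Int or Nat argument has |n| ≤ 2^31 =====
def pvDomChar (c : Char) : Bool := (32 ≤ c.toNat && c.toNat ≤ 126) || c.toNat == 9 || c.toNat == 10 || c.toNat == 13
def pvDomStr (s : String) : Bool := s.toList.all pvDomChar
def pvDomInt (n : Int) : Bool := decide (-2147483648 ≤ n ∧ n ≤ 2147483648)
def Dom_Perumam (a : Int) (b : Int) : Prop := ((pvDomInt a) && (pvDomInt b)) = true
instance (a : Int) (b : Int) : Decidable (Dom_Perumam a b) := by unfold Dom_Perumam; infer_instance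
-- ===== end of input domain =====

-- ===== PORT A =====
-- B avoids string conversion entirely: after a sign test it extracts the digits of
-- max(a,b) arithmetically by repeated divmod 10, prepending Tamil digits, instead of
-- A's scan of str(max(a,b)) through a dict with a break-and-count check (objective: alternative).
-- Num_Map from A, as an insertion-ordered PySem.Dict. Values are one-char Tamil strings.
def Perumam.numMap : PySem.Dict Char String :=
  PySem.Dict.ofList [('0', "௦"), ('1', "௧"), ('2', "௨"), ('3', "௩"), ('4', "௪"),
                     ('5', "௫"), ('6', "௬"), ('7', "௭"), ('8', "௮"), ('9', "௯"),
                     ('-', "-"), ('.', ".")]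

-- A's for-loop with break: walks the chars of Input in order, appending Num_Map[c] and
-- counting, stopping at the first char that is neither a digit nor '.'.
-- Num_Map[c] is ported as (get? c).getD "": exact here because every char the branch
-- reaches (an ASCII digit of str(int), or '.') is a key of Num_Map, so KeyError is unreachable.
def Perumam.loop : List Char → String → Nat → String × Nat
  | [], result, count => (result, count)
  | c :: rest, result, count =>
    if PySem.Chars.isdigit c || (c == '.') then
      Perumam.loop rest (result ++ ((Perumam.numMap.get? c).getD "")) (count + 1)
    else
      (result, count)

def Perumam (a : Int) (b : Int) : String :=
  let input := PySem.Int.toChars (max a b)   -- str(max(a,b)) as its char list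
  let (result, count) := Perumam.loop input "" 0
  if input.length == count then result else "தவறான உள்ளீடு"

-- ===== PORT B =====
def pvAltTamil : List Char := "௦௧௨௩௪௫௬௭௮௯".toList

-- Source B's while-loop: prepend digits[m % 10], m //= 10, stop when m = 0.
-- digits[m % 10] is ported as getD: always in range since m % 10 < 10.
def pvAltLoop (m : Nat) (out : List Char) : List Char :=
  let out' := pvAltTamil.getD (m % 10) ' ' :: out
  if h : m / 10 = 0 then out'
  else pvAltLoop (m / 10) out'
decreasing_by
  exact Nat.div_lt_self (Nat.pos_of_ne_zero (fun hm => h (by simp [hm]))) (by norm_num)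

def Perumam_alt (a : Int) (b : Int) : String :=
  let m := max a b
  if m < 0 then "தவறான உள்ளீடு"
  else String.ofList (pvAltLoop m.toNat [])

-- ===== PRECONDITION & SPEC =====
def Spec_Perumam (a : Int) (b : Int) (out : String) : Prop := out = Perumam_alt a b
instance (a : Int) (b : Int) (out : String) : Decidable (Spec_Perumam a b out) := by unfold Spec_Perumam; infer_instance

-- ===== CLAIM (what is proved, stated in full; the proofs are below) =====
def Claim_equal_Perumam : Prop := ∀ (a : Int) (b : Int), Dom_Perumam a b → Spec_Perumam a b (Perumam a b)

-- ===== LEMMAS AND PROOFS =====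

-- the char-level bridge used only by the proofs: Tamil digit of an ASCII digit char
def pvF (c : Char) : Char := pvAltTamil.getD (c.toNat - 48) ' '

lemma ofList_cons (a : Char) (l : List Char) :
    String.ofList (a :: l) = String.ofList [a] ++ String.ofList l := by
  apply String.ext; simp

-- every char produced by Nat.toDigitsCore with base 10 is one of the ten ASCII digits,
-- or came from the accumulator
lemma mem_toDigitsCore_ten (fuel : Nat) (c : Char) :
    ∀ (n : Nat) (ds : List Char), c ∈ Nat.toDigitsCore 10 fuel n ds →
      c ∈ ds ∨ c ∈ ['0','1','2','3','4','5','6','7','8','9'] := by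
  induction fuel with
  | zero => intro n ds h; exact Or.inl h
  | succ f ih =>
    intro n ds h
    have hd : (n % 10).digitChar ∈ ['0','1','2','3','4','5','6','7','8','9'] := by
      have h10 : n % 10 < 10 := Nat.mod_lt _ (by norm_num)
      interval_cases (n % 10) <;> decide
    rw [Nat.toDigitsCore] at h
    by_cases hz : n / 10 = 0
    · simp only [hz] at h
      rcases List.mem_cons.mp h with h | h
      · exact Or.inr (h ▸ hd)
      · exact Or.inl h
    · simp only [hz, if_false] at h
      rcases ih (n / 10) ((n % 10).digitChar :: ds) h with h' | h'
      · rcases List.mem_cons.mp h' with h'' | h''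
        · exact Or.inr (h'' ▸ hd)
        · exact Or.inl h''
      · exact Or.inr h'

lemma mem_toDigits_ten (n : Nat) (c : Char) (h : c ∈ Nat.toDigits 10 n) :
    c ∈ ['0','1','2','3','4','5','6','7','8','9'] := by
  rcases mem_toDigitsCore_ten (n + 1) c n [] h with h' | h'
  · simp at h'
  · exact h'

-- per-char agreement on A's side: on a digit char A's branch fires and its dict value
-- is the one-char string of the Tamil digit
lemma step_digit (c : Char) (hc : c ∈ ['0','1','2','3','4','5','6','7','8','9']) :
    (PySem.Chars.isdigit c || (c == '.')) = true ∧
      (Perumam.numMap.get? c).getD "" = String.ofList [pvF c] := by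
  fin_cases hc <;> exact ⟨by decide, by decide⟩

-- A's loop on a list of digit chars never breaks: it maps every char and counts them all
lemma loop_digits (cs : List Char) (h : ∀ c ∈ cs, c ∈ ['0','1','2','3','4','5','6','7','8','9']) :
    ∀ (res : String) (cnt : Nat),
      Perumam.loop cs res cnt = (res ++ String.ofList (cs.map pvF), cnt + cs.length) := by
  induction cs with
  | nil => intro res cnt; simp [Perumam.loop]
  | cons c rest ih =>
    intro res cnt
    obtain ⟨h1, h2⟩ := step_digit c (h c (List.mem_cons_self))
    have hrest : ∀ x ∈ rest, x ∈ ['0','1','2','3','4','5','6','7','8','9'] :=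
      fun x hx => h x (List.mem_cons_of_mem _ hx)
    rw [Perumam.loop, if_pos h1, ih hrest]
    refine Prod.ext ?_ (by simp; omega)
    rw [List.map_cons, ofList_cons, h2, String.append_assoc]

-- toDigitsCore pulls its accumulator out as a suffix
lemma toDigitsCore_acc (fuel : Nat) :
    ∀ (n : Nat) (ds : List Char),
      Nat.toDigitsCore 10 fuel n ds = Nat.toDigitsCore 10 fuel n [] ++ ds := by
  induction fuel with
  | zero => intro n ds; simp [Nat.toDigitsCore]
  | succ f ih =>
    intro n ds
    rw [Nat.toDigitsCore, Nat.toDigitsCore]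
    by_cases hz : n / 10 = 0
    · simp [hz]
    · simp only [hz, if_false]
      rw [ih (n / 10) ((n % 10).digitChar :: ds), ih (n / 10) [(n % 10).digitChar]]
      simp

-- toDigitsCore is fuel-irrelevant once fuel exceeds n
lemma toDigitsCore_fuel (fuel : Nat) :
    ∀ (fuel' n : Nat), n < fuel → n < fuel' →
      Nat.toDigitsCore 10 fuel n [] = Nat.toDigitsCore 10 fuel' n [] := by
  induction fuel with
  | zero => intro _ n h _; omega
  | succ f ih =>
    intro fuel' n h h'
    cases fuel' with
    | zero => omega
    | succ f' =>
      rw [Nat.toDigitsCore, Nat.toDigitsCore]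
      by_cases hz : n / 10 = 0
      · simp [hz]
      · simp only [hz, if_false]
        have hn : 0 < n := Nat.pos_of_ne_zero (fun hm => hz (by simp [hm]))
        have hlt : n / 10 < n := Nat.div_lt_self hn (by norm_num)
        rw [toDigitsCore_acc f, toDigitsCore_acc f', ih f' (n / 10) (by omega) (by omega)]

-- one divmod step of Nat.toDigits
lemma toDigits_decomp (n : Nat) :
    Nat.toDigits 10 n =
      (if n / 10 = 0 then [] else Nat.toDigits 10 (n / 10)) ++ [(n % 10).digitChar] := by
  rw [Nat.toDigits, Nat.toDigitsCore]
  by_cases hz : n / 10 = 0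
  · simp [hz]
  · simp only [hz, if_false]
    have hn : 0 < n := Nat.pos_of_ne_zero (fun hm => hz (by simp [hm]))
    have hlt : n / 10 < n := Nat.div_lt_self hn (by norm_num)
    rw [toDigitsCore_acc n, Nat.toDigits,
        toDigitsCore_fuel n (n / 10 + 1) (n / 10) (by omega) (by omega)]

-- the Tamil digit B indexes arithmetically is pvF of the ASCII digit char A maps
lemma tamil_digitChar (d : Nat) (hd : d < 10) :
    pvAltTamil[d]?.getD ' ' = pvF d.digitChar := by
  interval_cases d <;> decide

-- B's divmod loop builds exactly the pvF-image of the decimal digit string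
lemma alt_loop_eq (n : Nat) :
    ∀ (out : List Char), pvAltLoop n out = (Nat.toDigits 10 n).map pvF ++ out := by
  induction n using Nat.strong_induction_on with
  | _ n ih =>
    intro out
    rw [pvAltLoop]
    by_cases hz : n / 10 = 0
    · simp only [hz, dif_pos]
      rw [toDigits_decomp n, hz, if_pos rfl]
      simp
      exact tamil_digitChar (n % 10) (Nat.mod_lt _ (by norm_num))
    · simp only [hz, dif_neg, not_false_iff]
      have hn : 0 < n := Nat.pos_of_ne_zero (fun hm => hz (by simp [hm]))
      rw [ih (n / 10) (Nat.div_lt_self hn (by norm_num))]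
      rw [toDigits_decomp n, if_neg hz]
      simp
      exact tamil_digitChar (n % 10) (Nat.mod_lt _ (by norm_num))

-- ===== VERDICT (by name: the statement is the Claim_ definition above) =====
theorem Perumam_spec : Claim_equal_Perumam := by
  intro a b _
  unfold Spec_Perumam
  by_cases hm : max a b < 0
  · -- negative: str starts with '-', A breaks at once with count 0 ≠ length
    have hA : Perumam a b = "தவறான உள்ளீடு" := by
      unfold Perumam
      rw [show PySem.Int.toChars (max a b) = '-' :: Nat.toDigits 10 (max a b).natAbs by
            simp [PySem.Int.toChars, hm]]
      simp [Perumam.loop, (by decide : PySem.Chars.isdigit '-' = false)]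
    rw [hA]
    unfold Perumam_alt
    rw [if_pos hm]
  · -- nonnegative: every char of str is an ASCII digit; A maps them all, B rebuilds
    -- the same list by divmod
    have hmem : ∀ c ∈ Nat.toDigits 10 (max a b).toNat,
        c ∈ ['0','1','2','3','4','5','6','7','8','9'] :=
      fun c hc => mem_toDigits_ten _ c hc
    have htc : PySem.Int.toChars (max a b) = Nat.toDigits 10 (max a b).toNat := by
      simp [PySem.Int.toChars, hm]
    have hA : Perumam a b = String.ofList ((Nat.toDigits 10 (max a b).toNat).map pvF) := by
      unfold Perumam
      rw [htc]
      simp only [loop_digits _ hmem]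
      simp
    rw [hA]
    unfold Perumam_alt
    rw [if_neg hm]
    rw [alt_loop_eq (max a b).toNat []]
    simp
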